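-- pv_equiv track=rewrite | github.com/mratet/advent-of-code_python | solutions/2023/day_21/clean_solution.py | bfs
-- ===== SOURCE A (Python) =====
-- import collections
--
-- def bfs(maze, start, nb):
--     q = collections.deque()
--     n = 1 + max(maze.keys())[0]
--
--     q.append(start)
--     visited = set()
--
--     for i in range(nb):
--         visited.clear()
--         for _ in range(len(q)):
--             x, y = q.popleft()
--
--             for move in (0, 1), (0, -1), (1, 0), (-1, 0):
--                 nx = x + move[0]
--                 ny = y + move[1]
--                 current_car = maze.get((nx % n, ny % n), "#")
--
--                 if current_car != "#" and (nx, ny) not in visited: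
--                     visited.add((nx, ny))
--                     q.append((nx, ny))
--
--     return len(q)
-- ===== SOURCE B (Python) =====
-- def bfs(maze, start, nb):
--     n = 1 + max(maze.keys())[0]
--     frontier = [start]
--     for _ in range(nb):
--         candidates = sorted((x + dx, y + dy)
--                             for x, y in frontier
--                             for dx, dy in ((0, 1), (0, -1), (1, 0), (-1, 0)))
--         next_frontier = []
--         prev = None
--         for p in candidates:
--             if p != prev and maze.get((p[0] % n, p[1] % n), "#") != "#":
--                 next_frontier.append(p)
--             prev = p
--         frontier = next_frontier
--     return len(frontier)
-- ===== Notes on version B (the rewrite author's own statement) =====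
-- stated objective: alternative
-- what changed: Replaces A's BFS deque with a per-level cleared hash visited-set by a sort-then-scan mechanism: each step gathers all neighbour candidates with duplicates as a plain list, sorts it lexicographically, and one linear scan drops adjacent duplicates and closed cells; no set, deque or hashing anywhere.
import Mathlib
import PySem

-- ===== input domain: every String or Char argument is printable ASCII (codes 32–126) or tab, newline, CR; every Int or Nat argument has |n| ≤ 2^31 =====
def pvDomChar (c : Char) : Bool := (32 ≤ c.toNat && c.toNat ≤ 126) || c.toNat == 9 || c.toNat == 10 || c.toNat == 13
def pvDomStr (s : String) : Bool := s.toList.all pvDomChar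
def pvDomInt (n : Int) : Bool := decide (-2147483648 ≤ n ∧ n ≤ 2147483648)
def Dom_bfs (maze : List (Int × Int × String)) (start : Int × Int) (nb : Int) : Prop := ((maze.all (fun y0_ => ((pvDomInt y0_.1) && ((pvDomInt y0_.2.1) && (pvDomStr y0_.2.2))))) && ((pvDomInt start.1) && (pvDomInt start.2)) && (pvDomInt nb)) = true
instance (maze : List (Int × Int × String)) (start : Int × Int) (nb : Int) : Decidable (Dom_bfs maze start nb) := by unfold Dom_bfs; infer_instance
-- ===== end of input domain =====

-- B replaces A's deque + per-level hash visited-set with sort-then-scan deduplication: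
-- gather all neighbour candidates with duplicates, sort lexicographically, one linear scan
-- skips adjacent duplicates and closed cells (objective: alternative, not claimed faster).

-- the maze dict, rebuilt from the flattened (x, y, car) triples (marshalling, shared by both ports)
def pvMazeDict (maze : List (Int × Int × String)) : PySem.Dict (Int × Int) String :=
  PySem.Dict.ofList (maze.map (fun e => ((e.1, e.2.1), e.2.2)))

-- n = 1 + max(maze.keys())[0]  (lexicographic max of the keys; default never used inside Pre_)
def pvMazeN (maze : List (Int × Int × String)) : Int :=
  1 + ((PySem.List.max2? (pvMazeDict maze).keys (fun k => k.1) (fun k => k.2)).getD (0, 0)).1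

-- ===== PORT A =====
def bfsMovesA : List (Int × Int) := [(0, 1), (0, -1), (1, 0), (-1, 0)]

-- the inner 'for move in …' loop of A: state = (q after the pops so far, visited)
def bfsCellA (d : PySem.Dict (Int × Int) String) (n : Int) (c : Int × Int)
    (st : List (Int × Int) × PySem.Set (Int × Int)) : List (Int × Int) × PySem.Set (Int × Int) :=
  bfsMovesA.foldl (fun st m =>
    let nx := c.1 + m.1
    let ny := c.2 + m.2
    let cc := d.getD (PySem.Int.mod nx n, PySem.Int.mod ny n) "#"
    if cc ≠ "#" ∧ (nx, ny) ∉ st.2 then (st.1 ++ [(nx, ny)], PySem.Set.add st.2 (nx, ny)) else st) st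

-- 'for _ in range(len(q)): x, y = q.popleft(); …' — k counts the pops; the [] case is
-- unreachable for k ≤ q.length (Python's popleft would raise there)
def bfsInnerA (d : PySem.Dict (Int × Int) String) (n : Int) :
    Nat → List (Int × Int) → PySem.Set (Int × Int) → List (Int × Int) × PySem.Set (Int × Int)
  | 0, q, v => (q, v)
  | _ + 1, [], v => ([], v)
  | k + 1, c :: rest, v =>
      let st := bfsCellA d n c (rest, v)
      bfsInnerA d n k st.1 st.2

def bfs (maze : List (Int × Int × String)) (start : Int × Int) (nb : Int) : Int :=
  let d := pvMazeDict maze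
  let n := pvMazeN maze
  let st := (PySem.List.pyRange 0 nb 1).foldl
    (fun st _ => bfsInnerA d n st.1.length st.1 PySem.Set.empty)   -- visited.clear()
    ([start], PySem.Set.empty)
  (st.1.length : Int)

-- ===== PORT B =====
def bfsMovesB : List (Int × Int) := [(0, 1), (0, -1), (1, 0), (-1, 0)]

-- the generator: all neighbour candidates, duplicates kept
def bfsCandB (fr : List (Int × Int)) : List (Int × Int) :=
  fr.flatMap (fun c => bfsMovesB.map (fun m => (c.1 + m.1, c.2 + m.2)))

-- sorted(...) then the prev-scan: append p when p != prev and the wrapped cell is open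
def bfsStepB (d : PySem.Dict (Int × Int) String) (n : Int) (fr : List (Int × Int)) :
    List (Int × Int) :=
  let cands := PySem.List.sorted2 (bfsCandB fr) Prod.fst Prod.snd false
  (cands.foldl (fun st p =>
      (if some p ≠ st.2 ∧ d.getD (PySem.Int.mod p.1 n, PySem.Int.mod p.2 n) "#" ≠ "#"
       then st.1 ++ [p] else st.1, some p))
    (([] : List (Int × Int)), (none : Option (Int × Int)))).1

def bfs_alt (maze : List (Int × Int × String)) (start : Int × Int) (nb : Int) : Int :=
  let d := pvMazeDict maze
  let n := pvMazeN maze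
  let fr := (PySem.List.pyRange 0 nb 1).foldl (fun fr _ => bfsStepB d n fr) [start]
  (fr.length : Int)

-- ===== PRECONDITION & SPEC =====
-- Pre_ excludes exactly the inputs where Python A raises: an empty maze (ValueError from
-- max) and n = 0 with at least one step (ZeroDivisionError from % n); B raises there too.
def Pre_bfs (maze : List (Int × Int × String)) (start : Int × Int) (nb : Int) : Prop :=
  maze ≠ [] ∧ (0 < nb → pvMazeN maze ≠ 0)
instance (maze : List (Int × Int × String)) (start : Int × Int) (nb : Int) : Decidable (Pre_bfs maze start nb) := by unfold Pre_bfs; infer_instance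

def pvWitness_bfs : (List (Int × Int × String)) × (Int × Int) × Int :=
  ([(0, 0, "."), (0, 1, "#"), (1, 0, "."), (1, 1, ".")], (0, 0), 3)

def Spec_bfs (maze : List (Int × Int × String)) (start : Int × Int) (nb : Int) (out : Int) : Prop := out = bfs_alt maze start nb
instance (maze : List (Int × Int × String)) (start : Int × Int) (nb : Int) (out : Int) : Decidable (Spec_bfs maze start nb out) := by unfold Spec_bfs; infer_instance

-- ===== CLAIM (what is proved, stated in full; the proofs are below) =====
def Claim_equal_bfs : Prop := ∀ (maze : List (Int × Int × String)) (start : Int × Int) (nb : Int), Dom_bfs maze start nb → Pre_bfs maze start nb → Spec_bfs maze start nb (bfs maze start nb)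

-- ===== LEMMAS AND PROOFS =====

-- the open-cell test both step bodies make
abbrev pvOk (d : PySem.Dict (Int × Int) String) (n : Int) (p : Int × Int) : Prop :=
  d.getD (PySem.Int.mod p.1 n, PySem.Int.mod p.2 n) "#" ≠ "#"

-- proof-side view of A's move-loop body (definitionally the port's lambda)
def pvFA (d : PySem.Dict (Int × Int) String) (n : Int) (c : Int × Int)
    (st : List (Int × Int) × PySem.Set (Int × Int)) (m : Int × Int) :
    List (Int × Int) × PySem.Set (Int × Int) :=
  if d.getD (PySem.Int.mod (c.1 + m.1) n, PySem.Int.mod (c.2 + m.2) n) "#" ≠ "#"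
      ∧ (c.1 + m.1, c.2 + m.2) ∉ st.2
  then (st.1 ++ [(c.1 + m.1, c.2 + m.2)], PySem.Set.add st.2 (c.1 + m.1, c.2 + m.2)) else st

-- the set-only view of the same body
def pvFS (d : PySem.Dict (Int × Int) String) (n : Int) (c : Int × Int)
    (s : PySem.Set (Int × Int)) (m : Int × Int) : PySem.Set (Int × Int) :=
  if pvOk d n (c.1 + m.1, c.2 + m.2) then PySem.Set.add s (c.1 + m.1, c.2 + m.2) else s

-- the set of cells one A-level produces from queue q
def pvStepSet (d : PySem.Dict (Int × Int) String) (n : Int) (q : List (Int × Int)) :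
    PySem.Set (Int × Int) :=
  q.foldl (fun s c => bfsMovesA.foldl (pvFS d n c) s) PySem.Set.empty

theorem bfsCellA_eq (d : PySem.Dict (Int × Int) String) (n : Int) (c : Int × Int)
    (st : List (Int × Int) × PySem.Set (Int × Int)) :
    bfsCellA d n c st = bfsMovesA.foldl (pvFA d n c) st := rfl

-- the queue component of the move-fold is append-homomorphic (the test only reads visited)
theorem pvFA_hom (d : PySem.Dict (Int × Int) String) (n : Int) (c : Int × Int) :
    ∀ (ms : List (Int × Int)) (L : List (Int × Int)) (v : PySem.Set (Int × Int)),
      ms.foldl (pvFA d n c) (L, v)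
        = (L ++ (ms.foldl (pvFA d n c) ([], v)).1, (ms.foldl (pvFA d n c) ([], v)).2) := by
  intro ms
  induction ms with
  | nil => intro L v; simp
  | cons m ms ih =>
    intro L v
    simp only [List.foldl_cons, pvFA]
    by_cases h : d.getD (PySem.Int.mod (c.1 + m.1) n, PySem.Int.mod (c.2 + m.2) n) "#" ≠ "#"
        ∧ (c.1 + m.1, c.2 + m.2) ∉ v
    · rw [if_pos h, if_pos h,
        ih (L ++ [(c.1 + m.1, c.2 + m.2)]) (PySem.Set.add v (c.1 + m.1, c.2 + m.2)),
        ih ([] ++ [(c.1 + m.1, c.2 + m.2)]) (PySem.Set.add v (c.1 + m.1, c.2 + m.2))]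
      simp [List.append_assoc]
    · rw [if_neg h, if_neg h, ih L v]

-- the counted popleft loop is a fold over the cells present when the level started
theorem bfsInnerA_spec (d : PySem.Dict (Int × Int) String) (n : Int) :
    ∀ (cells extra : List (Int × Int)) (v : PySem.Set (Int × Int)),
      bfsInnerA d n cells.length (cells ++ extra) v
        = cells.foldl (fun st c => bfsMovesA.foldl (pvFA d n c) st) (extra, v) := by
  intro cells
  induction cells with
  | nil => intro extra v; simp [bfsInnerA]
  | cons c cells ih =>
    intro extra v
    simp only [List.length_cons, List.cons_append, List.foldl_cons]
    show bfsInnerA d n cells.length (bfsCellA d n c (cells ++ extra, v)).1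
        (bfsCellA d n c (cells ++ extra, v)).2
      = cells.foldl (fun st c => bfsMovesA.foldl (pvFA d n c) st)
          (bfsMovesA.foldl (pvFA d n c) (extra, v))
    rw [show bfsCellA d n c (cells ++ extra, v)
          = (cells ++ (extra ++ (bfsMovesA.foldl (pvFA d n c) ([], v)).1),
             (bfsMovesA.foldl (pvFA d n c) ([], v)).2) by
        rw [bfsCellA_eq, pvFA_hom d n c bfsMovesA (cells ++ extra) v]
        simp [List.append_assoc]]
    rw [ih (extra ++ (bfsMovesA.foldl (pvFA d n c) ([], v)).1)
          (bfsMovesA.foldl (pvFA d n c) ([], v)).2,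
      show bfsMovesA.foldl (pvFA d n c) (extra, v)
          = (extra ++ (bfsMovesA.foldl (pvFA d n c) ([], v)).1,
             (bfsMovesA.foldl (pvFA d n c) ([], v)).2) from pvFA_hom d n c bfsMovesA extra v]

-- with queue = visited, A's move-fold is the set-only fold on both components
theorem pvF_diag (d : PySem.Dict (Int × Int) String) (n : Int) (c : Int × Int) :
    ∀ (ms : List (Int × Int)) (s : PySem.Set (Int × Int)),
      ms.foldl (pvFA d n c) (s, s)
        = (ms.foldl (pvFS d n c) s, ms.foldl (pvFS d n c) s) := by
  intro ms
  induction ms with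
  | nil => intro s; rfl
  | cons m ms ih =>
    intro s
    simp only [List.foldl_cons, pvFA, pvFS, pvOk]
    by_cases ho : d.getD (PySem.Int.mod (c.1 + m.1) n, PySem.Int.mod (c.2 + m.2) n) "#" ≠ "#"
    · by_cases hv : (c.1 + m.1, c.2 + m.2) ∈ s
      · rw [if_neg (by simp [ho, hv]), if_pos ho, PySem.Set.add_of_mem hv]
        exact ih s
      · rw [if_pos ⟨ho, hv⟩, if_pos ho, PySem.Set.add_of_not_mem hv]
        exact ih (s ++ [(c.1 + m.1, c.2 + m.2)])
    · rw [if_neg (by simp [ho]), if_neg ho]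
      exact ih s

-- one A-level on any queue is pvStepSet of that queue
theorem stepA_eq (d : PySem.Dict (Int × Int) String) (n : Int) (q : List (Int × Int)) :
    (bfsInnerA d n q.length q PySem.Set.empty).1 = pvStepSet d n q := by
  have aux : ∀ (l : List (Int × Int)) (s : PySem.Set (Int × Int)),
      l.foldl (fun st c => bfsMovesA.foldl (pvFA d n c) st) (s, s)
        = (l.foldl (fun s c => bfsMovesA.foldl (pvFS d n c) s) s,
           l.foldl (fun s c => bfsMovesA.foldl (pvFS d n c) s) s) := by
    intro l
    induction l with
    | nil => intro s; rfl
    | cons c l ih =>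
      intro s
      simp only [List.foldl_cons]
      rw [pvF_diag d n c bfsMovesA s]
      exact ih _
  have h := bfsInnerA_spec d n q [] PySem.Set.empty
  rw [List.append_nil] at h
  rw [h]
  exact congrArg Prod.fst (aux q PySem.Set.empty)

-- membership in the move-fold of pvFS
theorem mem_foldl_pvFS (d : PySem.Dict (Int × Int) String) (n : Int) (c : Int × Int) :
    ∀ (ms : List (Int × Int)) (s : PySem.Set (Int × Int)) (x : Int × Int),
      x ∈ ms.foldl (pvFS d n c) s
        ↔ x ∈ s ∨ ∃ m ∈ ms, x = (c.1 + m.1, c.2 + m.2) ∧ pvOk d n x := by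
  intro ms
  induction ms with
  | nil => intro s x; simp
  | cons m ms ih =>
    intro s x
    simp only [List.foldl_cons, pvFS]
    by_cases ho : pvOk d n (c.1 + m.1, c.2 + m.2)
    · rw [if_pos ho, ih]
      rw [PySem.Set.mem_add]
      constructor
      · rintro (⟨hs | he⟩ | ⟨m', hm', hx, hok⟩)
        · exact Or.inl hs
        · exact Or.inr ⟨m, List.mem_cons_self, he, he ▸ ho⟩
        · exact Or.inr ⟨m', List.mem_cons_of_mem _ hm', hx, hok⟩
      · rintro (hs | ⟨m', hm', hx, hok⟩)
        · exact Or.inl (Or.inl hs)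
        · rcases List.mem_cons.mp hm' with h1 | h2
          · exact Or.inl (Or.inr (by rw [hx, h1]))
          · exact Or.inr ⟨m', h2, hx, hok⟩
    · rw [if_neg ho, ih]
      constructor
      · rintro (hs | ⟨m', hm', hx, hok⟩)
        · exact Or.inl hs
        · exact Or.inr ⟨m', List.mem_cons_of_mem _ hm', hx, hok⟩
      · rintro (hs | ⟨m', hm', hx, hok⟩)
        · exact Or.inl hs
        · rcases List.mem_cons.mp hm' with h1 | h2
          · exact absurd hok (by rw [hx, h1]; exact ho)
          · exact Or.inr ⟨m', h2, hx, hok⟩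

theorem mem_stepSet (d : PySem.Dict (Int × Int) String) (n : Int) (q : List (Int × Int))
    (x : Int × Int) :
    x ∈ pvStepSet d n q
      ↔ (∃ c ∈ q, ∃ m ∈ bfsMovesA, x = (c.1 + m.1, c.2 + m.2)) ∧ pvOk d n x := by
  have aux : ∀ (l : List (Int × Int)) (s : PySem.Set (Int × Int)),
      x ∈ l.foldl (fun s c => bfsMovesA.foldl (pvFS d n c) s) s
        ↔ x ∈ s ∨ ((∃ c ∈ l, ∃ m ∈ bfsMovesA, x = (c.1 + m.1, c.2 + m.2)) ∧ pvOk d n x) := by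
    intro l
    induction l with
    | nil => intro s; simp
    | cons c l ih =>
      intro s
      simp only [List.foldl_cons]
      rw [ih, mem_foldl_pvFS]
      constructor
      · rintro ((hs | ⟨m, hm, hx, hok⟩) | ⟨⟨c', hc', hm⟩, hok⟩)
        · exact Or.inl hs
        · exact Or.inr ⟨⟨c, List.mem_cons_self, m, hm, hx⟩, hok⟩
        · exact Or.inr ⟨⟨c', List.mem_cons_of_mem _ hc', hm⟩, hok⟩
      · rintro (hs | ⟨⟨c', hc', m, hm, hx⟩, hok⟩)
        · exact Or.inl (Or.inl hs)
        · rcases List.mem_cons.mp hc' with h1 | h2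
          · exact Or.inl (Or.inr ⟨m, hm, h1 ▸ hx, hok⟩)
          · exact Or.inr ⟨⟨c', h2, m, hm, hx⟩, hok⟩
  unfold pvStepSet
  rw [aux]
  simp

theorem nodup_stepSet (d : PySem.Dict (Int × Int) String) (n : Int) (q : List (Int × Int)) :
    (pvStepSet d n q).Nodup := by
  have auxm : ∀ (ms : List (Int × Int)) (c : Int × Int) (s : PySem.Set (Int × Int)),
      s.Nodup → (ms.foldl (pvFS d n c) s).Nodup := by
    intro ms
    induction ms with
    | nil => intro c s hs; exact hs
    | cons m ms ih =>
      intro c s hs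
      simp only [List.foldl_cons, pvFS]
      split_ifs with ho
      · exact ih c _ (PySem.Set.nodup_add _ _ hs)
      · exact ih c _ hs
  have aux : ∀ (l : List (Int × Int)) (s : PySem.Set (Int × Int)),
      s.Nodup → (l.foldl (fun s c => bfsMovesA.foldl (pvFS d n c) s) s).Nodup := by
    intro l
    induction l with
    | nil => intro s hs; exact hs
    | cons c l ih =>
      intro s hs
      simp only [List.foldl_cons]
      exact ih _ (auxm bfsMovesA c s hs)
  exact aux q PySem.Set.empty List.nodup_nil

-- ===== the lexicographic order B's sort uses =====
def pvLt (a b : Int × Int) : Prop := a.1 < b.1 ∨ (a.1 = b.1 ∧ a.2 < b.2)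
def pvLe (a b : Int × Int) : Prop := a.1 < b.1 ∨ (a.1 = b.1 ∧ a.2 ≤ b.2)

theorem pvLe_trans {a b c : Int × Int} (h1 : pvLe a b) (h2 : pvLe b c) : pvLe a c := by
  rcases a with ⟨a1, a2⟩; rcases b with ⟨b1, b2⟩; rcases c with ⟨c1, c2⟩
  simp only [pvLe] at *; omega

theorem pvLe_antisymm {a b : Int × Int} (h1 : pvLe a b) (h2 : pvLe b a) : a = b := by
  rcases a with ⟨a1, a2⟩; rcases b with ⟨b1, b2⟩
  simp only [pvLe] at *
  have : a1 = b1 ∧ a2 = b2 := by omega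
  simp [this.1, this.2]

-- sorted2's comparator, and its meaning
def pvCmp (a b : Int × Int) : Bool :=
  decide (a.1 < b.1) || (!decide (b.1 < a.1) && decide (a.2 < b.2))

theorem pvCmp_true_iff (a b : Int × Int) : pvCmp a b = true ↔ pvLt a b := by
  rcases a with ⟨a1, a2⟩; rcases b with ⟨b1, b2⟩
  simp only [pvCmp, pvLt, Bool.or_eq_true, Bool.and_eq_true, Bool.not_eq_true',
    decide_eq_true_eq, decide_eq_false_iff_not]
  omega

theorem pvCmp_false_le {a b : Int × Int} (h : pvCmp a b = false) : pvLe b a := by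
  rcases a with ⟨a1, a2⟩; rcases b with ⟨b1, b2⟩
  simp only [pvCmp, pvLe, Bool.or_eq_false_iff, Bool.and_eq_false_iff, Bool.not_eq_false',
    decide_eq_false_iff_not, decide_eq_true_eq] at *
  omega

theorem pvLt_le {a b : Int × Int} (h : pvLt a b) : pvLe a b := by
  rcases a with ⟨a1, a2⟩; rcases b with ⟨b1, b2⟩
  simp only [pvLt, pvLe] at *; omega

theorem sorted2_eq_foldl (xs : List (Int × Int)) :
    PySem.List.sorted2 xs Prod.fst Prod.snd false
      = xs.foldl (fun acc x => PySem.List.insertBy pvCmp x acc) [] := rfl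

theorem pairwise_insertBy (x : Int × Int) :
    ∀ (l : List (Int × Int)), l.Pairwise pvLe →
      (PySem.List.insertBy pvCmp x l).Pairwise pvLe := by
  intro l
  induction l with
  | nil => intro _; simp [PySem.List.insertBy]
  | cons y ys ih =>
    intro h
    rcases List.pairwise_cons.mp h with ⟨hy, hys⟩
    show (if pvCmp x y = true then x :: y :: ys else y :: PySem.List.insertBy pvCmp x ys).Pairwise pvLe
    split_ifs with hc
    · refine List.pairwise_cons.mpr ⟨?_, h⟩
      intro z hz
      rcases List.mem_cons.mp hz with rfl | hz'
      · exact pvLt_le ((pvCmp_true_iff x z).mp hc)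
      · exact pvLe_trans (pvLt_le ((pvCmp_true_iff x y).mp hc)) (hy z hz')
    · refine List.pairwise_cons.mpr ⟨?_, ih hys⟩
      intro z hz
      rcases (PySem.List.mem_insertBy pvCmp x z ys).mp hz with rfl | hz'
      · exact pvCmp_false_le (Bool.eq_false_iff.mpr hc)
      · exact hy z hz'

theorem pairwise_sorted2 (xs : List (Int × Int)) :
    (PySem.List.sorted2 xs Prod.fst Prod.snd false).Pairwise pvLe := by
  rw [sorted2_eq_foldl]
  have aux : ∀ (l : List (Int × Int)) (acc : List (Int × Int)), acc.Pairwise pvLe →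
      (l.foldl (fun acc x => PySem.List.insertBy pvCmp x acc) acc).Pairwise pvLe := by
    intro l
    induction l with
    | nil => intro acc h; exact h
    | cons x l ih =>
      intro acc h
      exact ih _ (pairwise_insertBy x acc h)
  exact aux xs [] List.Pairwise.nil

-- ===== B's prev-scan, as a structural recursion =====
def pvScan (d : PySem.Dict (Int × Int) String) (n : Int) :
    Option (Int × Int) → List (Int × Int) → List (Int × Int)
  | _, [] => []
  | prev, p :: t =>
      (if some p ≠ prev ∧ pvOk d n p then [p] else []) ++ pvScan d n (some p) t

theorem foldl_scan (d : PySem.Dict (Int × Int) String) (n : Int) :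
    ∀ (l : List (Int × Int)) (prev : Option (Int × Int)) (acc : List (Int × Int)),
      (l.foldl (fun st p =>
          (if some p ≠ st.2 ∧ d.getD (PySem.Int.mod p.1 n, PySem.Int.mod p.2 n) "#" ≠ "#"
           then st.1 ++ [p] else st.1, some p)) (acc, prev)).1
        = acc ++ pvScan d n prev l := by
  intro l
  induction l with
  | nil => intro prev acc; simp [pvScan]
  | cons p t ih =>
    intro prev acc
    simp only [List.foldl_cons, pvScan, pvOk]
    split_ifs with h
    · rw [ih (some p) (acc ++ [p])]; simp [List.append_assoc]
    · rw [ih (some p) acc]; simp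

theorem mem_scan (d : PySem.Dict (Int × Int) String) (n : Int) :
    ∀ (l : List (Int × Int)) (prev : Option (Int × Int)) (x : Int × Int),
      l.Pairwise pvLe → (∀ v, prev = some v → ∀ z ∈ l, pvLe v z) →
      (x ∈ pvScan d n prev l ↔ x ∈ l ∧ pvOk d n x ∧ prev ≠ some x) := by
  intro l
  induction l with
  | nil => intro prev x _ _; simp [pvScan]
  | cons p t ih =>
    intro prev x hs hprev
    rcases List.pairwise_cons.mp hs with ⟨hpt, ht⟩
    have hih := ih (some p) x ht (by rintro v hv z hz; cases Option.some.inj hv; exact hpt z hz)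
    simp only [pvScan, List.mem_append]
    constructor
    · rintro (hhead | htail)
      · rcases Decidable.em (some p ≠ prev ∧ pvOk d n p) with hc | hc
        · rw [if_pos hc] at hhead
          rcases List.mem_singleton.mp hhead with rfl
          exact ⟨List.mem_cons_self, hc.2, fun he => hc.1 he.symm⟩
        · rw [if_neg hc] at hhead; simp at hhead
      · rcases hih.mp htail with ⟨hxt, hok, hne⟩
        refine ⟨List.mem_cons_of_mem _ hxt, hok, ?_⟩
        intro he
        rcases prev with _ | v
        · exact absurd he (by simp)
        · cases Option.some.inj he
          have h1 : pvLe x p := hprev x rfl p List.mem_cons_self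
          have h2 : pvLe p x := hpt x hxt
          exact hne (by rw [pvLe_antisymm h2 h1])
    · rintro ⟨hx, hok, hne⟩
      rcases List.mem_cons.mp hx with rfl | hxt
      · exact Or.inl (by rw [if_pos ⟨fun he => hne he.symm, hok⟩]; simp)
      · by_cases hxp : x = p
        · subst hxp
          exact Or.inl (by rw [if_pos ⟨fun he => hne he.symm, hok⟩]; simp)
        · exact Or.inr (hih.mpr ⟨hxt, hok, fun he => hxp (Option.some.inj he).symm⟩)

theorem nodup_scan (d : PySem.Dict (Int × Int) String) (n : Int) :
    ∀ (l : List (Int × Int)) (prev : Option (Int × Int)),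
      l.Pairwise pvLe → (∀ v, prev = some v → ∀ z ∈ l, pvLe v z) →
      (pvScan d n prev l).Nodup := by
  intro l
  induction l with
  | nil => intro prev _ _; simp [pvScan]
  | cons p t ih =>
    intro prev hs hprev
    rcases List.pairwise_cons.mp hs with ⟨hpt, ht⟩
    have hprev' : ∀ v, some p = some v → ∀ z ∈ t, pvLe v z := by
      rintro v hv z hz; cases Option.some.inj hv; exact hpt z hz
    simp only [pvScan]
    rcases Decidable.em (some p ≠ prev ∧ pvOk d n p) with hc | hc
    · rw [if_pos hc]
      refine List.nodup_cons.mpr ⟨?_, ih (some p) ht hprev'⟩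
      intro hmem
      rcases (mem_scan d n t (some p) p ht hprev').mp hmem with ⟨_, _, hne⟩
      exact hne rfl
    · rw [if_neg hc]
      simpa using ih (some p) ht hprev'

-- B's step: membership and nodup
theorem mem_candB (q : List (Int × Int)) (x : Int × Int) :
    x ∈ bfsCandB q ↔ ∃ c ∈ q, ∃ m ∈ bfsMovesB, x = (c.1 + m.1, c.2 + m.2) := by
  simp only [bfsCandB, List.mem_flatMap, List.mem_map]
  constructor
  · rintro ⟨c, hc, m, hm, rfl⟩; exact ⟨c, hc, m, hm, rfl⟩
  · rintro ⟨c, hc, m, hm, rfl⟩; exact ⟨c, hc, m, hm, rfl⟩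

theorem bfsStepB_eq_scan (d : PySem.Dict (Int × Int) String) (n : Int) (q : List (Int × Int)) :
    bfsStepB d n q
      = pvScan d n none (PySem.List.sorted2 (bfsCandB q) Prod.fst Prod.snd false) := by
  unfold bfsStepB
  rw [foldl_scan]
  simp

theorem mem_stepB (d : PySem.Dict (Int × Int) String) (n : Int) (q : List (Int × Int))
    (x : Int × Int) :
    x ∈ bfsStepB d n q
      ↔ (∃ c ∈ q, ∃ m ∈ bfsMovesB, x = (c.1 + m.1, c.2 + m.2)) ∧ pvOk d n x := by
  rw [bfsStepB_eq_scan,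
    mem_scan d n _ none x (pairwise_sorted2 _) (by rintro v hv; cases hv)]
  have hperm := PySem.List.sorted2_perm (bfsCandB q) Prod.fst Prod.snd false
  rw [hperm.mem_iff, mem_candB]
  simp

theorem nodup_stepB (d : PySem.Dict (Int × Int) String) (n : Int) (q : List (Int × Int)) :
    (bfsStepB d n q).Nodup := by
  rw [bfsStepB_eq_scan]
  exact nodup_scan d n _ none (pairwise_sorted2 _) (by rintro v hv; cases hv)

-- the two steps produce the same set of cells whenever their inputs have the same members
theorem step_mem_congr (d : PySem.Dict (Int × Int) String) (n : Int)
    (qA fB : List (Int × Int)) (hmem : ∀ x, x ∈ qA ↔ x ∈ fB) (x : Int × Int) :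
    x ∈ pvStepSet d n qA ↔ x ∈ bfsStepB d n fB := by
  rw [mem_stepSet, mem_stepB]
  have hmv : bfsMovesA = bfsMovesB := rfl
  constructor
  · rintro ⟨⟨c, hc, m, hm, hx⟩, hok⟩
    exact ⟨⟨c, (hmem c).mp hc, m, hmv ▸ hm, hx⟩, hok⟩
  · rintro ⟨⟨c, hc, m, hm, hx⟩, hok⟩
    exact ⟨⟨c, (hmem c).mpr hc, m, hmv ▸ hm, hx⟩, hok⟩

-- ===== VERDICT (by name: the statement is the Claim_ definition above) =====
theorem bfs_spec : Claim_equal_bfs := by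
  unfold Claim_equal_bfs
  intro maze start nb _ _
  unfold Spec_bfs
  simp only [bfs, bfs_alt]
  suffices H : ∀ (l : List Int) (qA fB : List (Int × Int)) (vA : PySem.Set (Int × Int)),
      qA.Nodup → fB.Nodup → (∀ x, x ∈ qA ↔ x ∈ fB) →
      let ra := (l.foldl (fun st _ =>
          bfsInnerA (pvMazeDict maze) (pvMazeN maze) st.1.length st.1 PySem.Set.empty) (qA, vA)).1
      let rb := l.foldl (fun fr _ => bfsStepB (pvMazeDict maze) (pvMazeN maze) fr) fB
      ra.Nodup ∧ rb.Nodup ∧ (∀ x, x ∈ ra ↔ x ∈ rb) by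
    have h := H (PySem.List.pyRange 0 nb 1) [start] [start] PySem.Set.empty
      (List.nodup_singleton _) (List.nodup_singleton _) (fun _ => Iff.rfl)
    rcases h with ⟨hn1, hn2, hm⟩
    have hperm := (List.perm_ext_iff_of_nodup hn1 hn2).mpr hm
    exact_mod_cast hperm.length_eq
  intro l
  induction l with
  | nil => intro qA fB vA h1 h2 h3; exact ⟨h1, h2, h3⟩
  | cons i l ih =>
    intro qA fB vA h1 h2 h3
    simp only [List.foldl_cons]
    rw [show bfsInnerA (pvMazeDict maze) (pvMazeN maze) qA.length qA PySem.Set.empty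
        = (pvStepSet (pvMazeDict maze) (pvMazeN maze) qA,
           (bfsInnerA (pvMazeDict maze) (pvMazeN maze) qA.length qA PySem.Set.empty).2) from by
      rw [← stepA_eq (pvMazeDict maze) (pvMazeN maze) qA]]
    exact ih _ _ _ (nodup_stepSet _ _ _) (nodup_stepB _ _ _)
      (step_mem_congr _ _ _ _ h3)
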